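-- pv_equiv track=rewrite | github.com/HTTP-APIs/hydrus | hydrus/parser/openapi_parser.py | valid_endpoint
-- ===== SOURCE A (Python) =====
-- def valid_endpoint(path: str) -> str:
--     """
--     Checks is the path ie endpoint is constructed properly or not
--     rejects 'A/{id}/B/C'
--     :param path: endpoint
--     :return:
--     """
--     # "collection" or true means valid
--     path_ = path.split('/')
--     for subPath in path_:
--         if "{" in subPath:
--             if subPath != path_[len(path_) - 1]:
--                 return "False"
--             else:
--                 return "Collection"
--     return "True"
-- ===== SOURCE B (Python) =====
-- def valid_endpoint(path: str) -> str:
--     """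
--     Checks is the path ie endpoint is constructed properly or not
--     rejects 'A/{id}/B/C'
--     :param path: endpoint
--     :return:
--     """
--     segs = path.split('/')
--     if not any('{' in s for s in segs):
--         return "True"
--     if any('{' in s for s in segs[:-1]):
--         return "False"
--     return "Collection"
-- ===== Notes on version B (the rewrite author's own statement) =====
-- stated objective: simpler
-- what changed: Replaces A's scan that compares the first brace-containing segment's VALUE with the last segment by a prefix-vs-last partition: no brace anywhere -> True, a brace in a non-last segment -> False, else Collection.
-- intended difference: On paths whose first brace-containing segment is not the last segment but is string-equal to it (e.g. '{id}/{id}'), A returns 'Collection' because it compares segment values instead of positions; B returns 'False', the intended verdict since a brace appears before the last segment. — e.g. on valid_endpoint("{id}/{id}"): A returns "Collection", B returns "False"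
import Mathlib
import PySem

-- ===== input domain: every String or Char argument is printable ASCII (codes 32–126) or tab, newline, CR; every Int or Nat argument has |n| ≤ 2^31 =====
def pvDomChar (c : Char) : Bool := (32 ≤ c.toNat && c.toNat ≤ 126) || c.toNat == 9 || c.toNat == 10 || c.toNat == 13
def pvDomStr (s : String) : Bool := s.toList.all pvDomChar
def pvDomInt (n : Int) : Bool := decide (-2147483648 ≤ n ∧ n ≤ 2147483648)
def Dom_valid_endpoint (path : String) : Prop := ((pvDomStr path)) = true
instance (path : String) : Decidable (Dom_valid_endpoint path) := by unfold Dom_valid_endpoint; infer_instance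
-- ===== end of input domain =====

-- B replaces A's find-first-brace-and-compare-its-value scan by a prefix-vs-last partition (simpler decomposition);
-- on paths where the first brace segment equals the last segment by value but is not last, B gives the intended "False" (see D_).

-- ===== PORT A =====
-- A's for-loop over path_: first segment containing "{" decides; it is compared by VALUE with
-- path_[len(path_)-1] (the index is always in range since split never returns an empty list,
-- so the .getD "" default is never used).
def valid_endpoint_loopA (path_ : List String) : List String → String
  | [] => "True"
  | subPath :: rest =>
    if PySem.Str.isIn "{" subPath then
      if subPath ≠ (PySem.List.pyGet? path_ ((path_.length : Int) - 1)).getD "" then "False"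
      else "Collection"
    else valid_endpoint_loopA path_ rest

def valid_endpoint (path : String) : String :=
  let path_ := (PySem.Str.split? path "/").getD []   -- sep "/" ≠ "", so split? is always some
  valid_endpoint_loopA path_ path_

-- ===== PORT B =====
def valid_endpoint_alt (path : String) : String :=
  let segs := (PySem.Str.split? path "/").getD []   -- sep "/" ≠ "", so split? is always some
  if !(segs.any (fun s => PySem.Str.isIn "{" s)) then "True"
  else if (PySem.List.slice segs none (some (-1))).any (fun s => PySem.Str.isIn "{" s) then "False"
  else "Collection"

-- ===== PRECONDITION & SPEC =====
-- On paths whose first brace-containing segment is not the last segment but is string-equal to it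
-- (e.g. "{id}/{id}"), A returns "Collection" because it compares segment values instead of positions;
-- B returns "False", the intended verdict since a brace appears before the last segment.
def D_valid_endpoint (path : String) : Prop :=
  let segs := path.toList.splitOn '/'
  segs.dropLast.find? (fun s => s.contains '{') = some (segs.getLastD [])
instance (path : String) : Decidable (D_valid_endpoint path) := by unfold D_valid_endpoint; infer_instance

def Spec_valid_endpoint (path : String) (out : String) : Prop := ¬ D_valid_endpoint path → out = valid_endpoint_alt path
instance (path : String) (out : String) : Decidable (Spec_valid_endpoint path out) := by unfold Spec_valid_endpoint; infer_instance

def pvDiffWitness_valid_endpoint : String := "{id}/{id}"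
def pvDiffWitnessOut_valid_endpoint : String × String := ("Collection", "False")

-- ===== CLAIM (what is proved, stated in full; the proofs are below) =====
def Claim_unchanged_valid_endpoint : Prop := ∀ (path : String), Dom_valid_endpoint path → Spec_valid_endpoint path (valid_endpoint path)
def Claim_changed_valid_endpoint : Prop := Dom_valid_endpoint (pvDiffWitness_valid_endpoint) ∧ D_valid_endpoint (pvDiffWitness_valid_endpoint) ∧ valid_endpoint (pvDiffWitness_valid_endpoint) = pvDiffWitnessOut_valid_endpoint.1 ∧ valid_endpoint_alt (pvDiffWitness_valid_endpoint) = pvDiffWitnessOut_valid_endpoint.2 ∧ pvDiffWitnessOut_valid_endpoint.1 ≠ pvDiffWitnessOut_valid_endpoint.2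
def Claim_exact_valid_endpoint : Prop := ∀ (path : String), Dom_valid_endpoint path → D_valid_endpoint path → valid_endpoint path ≠ valid_endpoint_alt path

-- ===== LEMMAS AND PROOFS =====

-- splitOn.go never returns the empty list
theorem pv_splitOn_go_ne_nil (sep : List Char) (fuel : Nat) (l cur : List Char)
    (acc : List (List Char)) : PySem.Chars.splitOn.go sep fuel l cur acc ≠ [] := by
  induction fuel generalizing l cur acc with
  | zero => simp [PySem.Chars.splitOn.go]
  | succ n ih =>
    cases l with
    | nil => simp [PySem.Chars.splitOn.go]
    | cons c rest =>
      rw [PySem.Chars.splitOn.go]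
      split
      · exact ih _ _ _
      · exact ih _ _ _

theorem pv_split_ne_nil (path : String) : (PySem.Str.split? path "/").getD [] ≠ [] := by
  simp [PySem.Str.split?, PySem.Chars.split?, PySem.Chars.splitOn]
  intro h
  exact pv_splitOn_go_ne_nil _ _ _ _ _ h

-- pyGet? at len-1 is the last element
theorem pv_pyGet_last (l : List String) (h : l ≠ []) :
    (PySem.List.pyGet? l ((l.length : Int) - 1)).getD "" = l.getLastD "" := by
  have hl : 0 < l.length := List.length_pos_iff.mpr h
  have : ((l.length : Int) - 1) = ((l.length - 1 : Nat) : Int) := by omega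
  rw [this, PySem.List.pyGet?_natCast]
  rw [List.getElem?_eq_getElem (by omega)]
  simp [List.getLastD_eq_getLast?, List.getLast?_eq_getElem?,
    List.getElem?_eq_getElem (show l.length - 1 < l.length by omega)]

-- A's loop returns according to the FIRST brace-containing segment, compared with the last element
theorem pv_loopA_eq (path_ : List String) (l : List String) :
    valid_endpoint_loopA path_ l =
      match l.find? (fun s => PySem.Str.isIn "{" s) with
      | none => "True"
      | some s => if s = (PySem.List.pyGet? path_ ((path_.length : Int) - 1)).getD ""
                  then "Collection" else "False" := by
  induction l with
  | nil => simp [valid_endpoint_loopA]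
  | cons s rest ih =>
    by_cases hs : PySem.Chars.isIn ['{'] s.toList = true
    · by_cases he : s = (PySem.List.pyGet? path_ ((path_.length : Int) - 1)).getD ""
      · subst he; simp [valid_endpoint_loopA, List.find?, hs]
      · simp [valid_endpoint_loopA, List.find?, hs, he]
    · simp [valid_endpoint_loopA, List.find?, hs, ih]

-- Chars.splitOn with a single-character separator is Mathlib's List.splitOnP
theorem pv_go_eq (c : Char) (fuel : Nat) (l cur : List Char) (acc : List (List Char))
    (hf : l.length ≤ fuel) :
    PySem.Chars.splitOn.go [c] fuel l cur acc
      = acc.reverse ++ List.modifyHead (fun t => cur.reverse ++ t) (List.splitOnP (· == c) l) := by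
  induction fuel generalizing l cur acc with
  | zero =>
    have hl : l = [] := by cases l <;> simp_all
    subst hl
    simp [PySem.Chars.splitOn.go, List.splitOnP_nil]
  | succ n ih =>
    cases l with
    | nil => simp [PySem.Chars.splitOn.go, List.splitOnP_nil]
    | cons x rest =>
      have hrest : rest.length ≤ n := by simpa using hf
      rw [PySem.Chars.splitOn.go, List.splitOnP_cons]
      by_cases hx : c = x
      · subst hx
        rw [if_pos (by simp [List.isPrefixOf])]
        have hd : List.drop ([c].length) (c :: rest) = rest := by simp
        rw [hd, ih rest [] _ hrest]
        rcases h : List.splitOnP (· == c) rest with _ | ⟨t, ts⟩ <;> simp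
      · have hxc : ¬ x = c := fun h => hx h.symm
        rw [if_neg (by simp [List.isPrefixOf]; exact hx)]
        rw [ih rest (x :: cur) _ hrest]
        rcases h : List.splitOnP (· == c) rest with _ | ⟨t, ts⟩ <;> simp [hxc]

theorem pv_chars_splitOn (cs : List Char) (c : Char) :
    PySem.Chars.splitOn cs [c] = cs.splitOn c := by
  rw [PySem.Chars.splitOn, pv_go_eq c _ cs [] [] (by omega)]
  rcases h : List.splitOnP (· == c) cs with _ | ⟨t, ts⟩ <;>
    simp [List.splitOn, h]

-- 'sub in s' for a one-character sub is membership
theorem pv_isIn_singleton (a : Char) (s : List Char) :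
    PySem.Chars.isIn [a] s = s.contains a := by
  by_cases hm : a ∈ s
  · rw [(PySem.Chars.isIn_iff_infix [a] s).mpr ((List.singleton_infix_iff a s).mpr hm)]
    simp [hm]
  · rw [(PySem.Chars.isIn_eq_false_iff [a] s).mpr (fun hinf => hm ((List.singleton_infix_iff a s).mp hinf))]
    simp [hm]

-- the common shape: both ports on segs = dropLast ++ [last]
theorem pv_main (path : String) :
    (¬ D_valid_endpoint path → valid_endpoint path = valid_endpoint_alt path) ∧
    (D_valid_endpoint path → valid_endpoint path = "Collection" ∧ valid_endpoint_alt path = "False") := by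
  have hne := pv_split_ne_nil path
  set segs := (PySem.Str.split? path "/").getD [] with hsegs
  have hlast : segs.getLastD "" = segs.getLast hne := by
    simp [List.getLastD_eq_getLast?, List.getLast?_eq_some_getLast hne]
  have hsplit : segs.dropLast ++ [segs.getLastD ""] = segs := by
    rw [hlast]; exact List.dropLast_append_getLast hne
  have hA : valid_endpoint path =
      match segs.find? (fun s => PySem.Str.isIn "{" s) with
      | none => "True"
      | some s => if s = segs.getLastD "" then "Collection" else "False" := by
    rw [valid_endpoint]
    rw [pv_loopA_eq, pv_pyGet_last _ hne]
  have hB : valid_endpoint_alt path =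
      if !(segs.any (fun s => PySem.Str.isIn "{" s)) then "True"
      else if segs.dropLast.any (fun s => PySem.Str.isIn "{" s) then "False"
      else "Collection" := by
    rw [valid_endpoint_alt]
    rw [PySem.List.slice_to_neg_one]
  have hmap : segs = (path.toList.splitOn '/').map String.ofList := by
    rw [hsegs]
    simp [PySem.Str.split?, PySem.Chars.split?, pv_chars_splitOn]
  have hcne : path.toList.splitOn '/' ≠ [] := by
    intro h
    exact hne (by rw [hmap, h]; rfl)
  obtain ⟨lastc, hlastc⟩ : ∃ x, (path.toList.splitOn '/').getLast? = some x := by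
    rcases h : (path.toList.splitOn '/').getLast? with _ | x
    · exact absurd (List.getLast?_eq_none_iff.mp h) hcne
    · exact ⟨x, rfl⟩
  have hql : segs.getLastD "" = String.ofList ((path.toList.splitOn '/').getLastD []) := by
    rw [hmap, List.getLastD_eq_getLast?, List.getLast?_map, hlastc,
      List.getLastD_eq_getLast?, hlastc]
    rfl
  have hfind2 : segs.dropLast.find? (fun s => PySem.Str.isIn "{" s)
      = ((path.toList.splitOn '/').dropLast.find? (fun s => s.contains '{')).map String.ofList := by
    rw [hmap, ← List.map_dropLast, List.find?_map]
    have hp : ((fun s => PySem.Str.isIn "{" s) ∘ String.ofList)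
        = (fun s : List Char => s.contains '{') := by
      funext s
      simp [Function.comp, pv_isIn_singleton]
    rw [hp]
  have hinj : ∀ (a b : List Char), String.ofList a = String.ofList b → a = b := by
    intro a b h
    have := congrArg String.toList h
    simpa using this
  have hD : D_valid_endpoint path ↔
      segs.dropLast.find? (fun s => PySem.Str.isIn "{" s) = some (segs.getLastD "") := by
    rw [hfind2, hql]
    show ((path.toList.splitOn '/').dropLast.find? (fun s => s.contains '{')
        = some ((path.toList.splitOn '/').getLastD [])) ↔ _
    constructor
    · intro h; rw [h]; rfl
    · intro h
      rcases hf : (path.toList.splitOn '/').dropLast.find? (fun s => s.contains '{') with _ | x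
      · rw [hf] at h; simp at h
      · rw [hf] at h
        simp only [Option.map_some, Option.some.injEq] at h
        rw [hf]
        exact congrArg some (hinj _ _ h)
  have hfind : segs.find? (fun s => PySem.Str.isIn "{" s) =
      (segs.dropLast.find? (fun s => PySem.Str.isIn "{" s)).or
        ([segs.getLastD ""].find? (fun s => PySem.Str.isIn "{" s)) := by
    conv_lhs => rw [← hsplit]
    exact List.find?_append
  have hany : segs.any (fun s => PySem.Str.isIn "{" s) =
      (segs.dropLast.any (fun s => PySem.Str.isIn "{" s) ||
        PySem.Str.isIn "{" (segs.getLastD "")) := by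
    conv_lhs => rw [← hsplit]
    simp
  constructor
  · intro hnd
    rw [hD] at hnd
    rw [hA, hB, hfind, hany]
    rcases hfp : segs.dropLast.find? (fun s => PySem.Str.isIn "{" s) with _ | s
    · -- no brace in the prefix
      have hpa : ∀ x ∈ segs.dropLast, ¬ PySem.Str.isIn "{" x = true := List.find?_eq_none.mp hfp
      simp only [PySem.Str.isIn_eq, Bool.not_eq_true, show "{".toList = ['{'] from rfl] at hpa
      by_cases hl : PySem.Chars.isIn ['{'] (segs.getLast?.getD "").toList = true
      · simp [List.find?, List.getLastD_eq_getLast?, hl]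
        exact fun x hx hc => absurd hc (by simp [hpa x hx])
      · simp [List.find?, List.getLastD_eq_getLast?, hl]
        exact fun x hx hc => absurd hc (by simp [hpa x hx])
    · -- first brace is in the prefix, and by ¬D it differs from the last element
      have hs_ne : s ≠ segs.getLastD "" := by
        intro h; exact hnd (by rw [hfp, h])
      have hpa : ∃ x ∈ segs.dropLast, PySem.Chars.isIn ['{'] x.toList = true :=
        ⟨s, List.mem_of_find?_eq_some hfp, by simpa using List.find?_some hfp⟩
      simp only [List.getLastD_eq_getLast?] at hs_ne
      simp [Option.or, List.getLastD_eq_getLast?, hs_ne, hpa]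
  · intro hd
    rw [hD] at hd
    have hpa : ∃ x ∈ segs.dropLast, PySem.Chars.isIn ['{'] x.toList = true :=
      ⟨_, List.mem_of_find?_eq_some hd, by simpa using List.find?_some hd⟩
    constructor
    · rw [hA, hfind, hd]
      simp [Option.or]
    · rw [hB, hany]
      simp [List.getLastD_eq_getLast?, hpa]

-- ===== VERDICT (by name: the statement is the Claim_ definition above) =====
theorem valid_endpoint_spec : Claim_unchanged_valid_endpoint := by
  intro path _ hnd
  exact (pv_main path).1 hnd

theorem valid_endpoint_changed : Claim_changed_valid_endpoint := by
  unfold Claim_changed_valid_endpoint; decide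

theorem valid_endpoint_tight : Claim_exact_valid_endpoint := by
  intro path _ hd
  obtain ⟨hA, hB⟩ := (pv_main path).2 hd
  rw [hA, hB]
  decide
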